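-- pv_equiv track=rewrite | github.com/SoftNacho/Tools4LanguageProcessing | SoftNacho-hw11-master/b.py | graphemes2ipa
-- ===== SOURCE A (Python) =====
-- def graphemes2ipa(graphemes):
--     #creating dict for IPA symbols
--     letterToIPA = {"i":"i", "a": "ɑ", "u":"u", "e":"ə",
--                    "p":"p", "t":"t", "k":"k", "kw":"kʷ", "q":"q", "qw":"qʷ",
--                    "v":"v", "l":"ɮ", "z":"z", "y":"j", "r":"ʐ", "g":"ɣ", "w":"ɣʷ", "gh":"ʁ", "ghw":"ʁʷ",
--                    "f":"f", "ll":"ɬ", "s":"s", "rr":"ʂ", "gg":"x", "wh":"xʷ", "ghh":"χ", "ghhw":"χʷ", "h":"h",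
--                    "m":"m", "n":"n", "ng":"ŋ", "ngw":"ŋʷ",
--                    "mm":"m̥", "nn":"n̥", "ngng":"ŋ̊", "ngngw":"ŋ̊ʷ",
--                    "\'":""}
--
--     fiveLetterGraphemes = ["ngngw"]
--     fourLetterGraphemes = ["ghhw", "ngng"]
--     threeLetterGraphemes = ["ghw", "ghh", "ngw"]
--     twoLetterGraphemes = ["kw", "qw", "gh", "ll", "rr", "gg", "wh", "ng", "mm", "nn"]
--     oneLetterGraphemes = ["i", "a", "u", "e", "p", "t", "k", "q", "v", "l", "z", "y", "r", "g", "w", "f", "s", "h", "m", "n"]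
--
--     apostrophe = ["\'"]
--
--     start = 0
--     end = len(graphemes)
--
--     return_word = ""
--
--     while start < end:
--         if graphemes[start:start+5] in fiveLetterGraphemes:
--             return_word = return_word + letterToIPA[graphemes[start:start+5]]
--             start += 5
--
--         elif graphemes[start:start+4] in fourLetterGraphemes:
--             return_word = return_word + letterToIPA[graphemes[start:start+4]]
--             start += 4
--
--         elif graphemes[start:start+3] in threeLetterGraphemes:
--             return_word = return_word + letterToIPA[graphemes[start:start+3]]
--             start += 3
--
--         elif graphemes[start:start+2] in twoLetterGraphemes:
--             return_word = return_word + letterToIPA[graphemes[start:start+2]]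
--             start += 2
--
--         elif graphemes[start] in oneLetterGraphemes:
--             return_word = return_word + letterToIPA[graphemes[start]]
--             start += 1
--
--         elif graphemes[start] in apostrophe:
--             return_word = return_word + letterToIPA[graphemes[start]]
--             start += 1
--
--         else:
--             return_word = return_word + graphemes[start]
--             start += 1
--
--
--     return return_word
-- ===== SOURCE B (Python) =====
-- # Greedy longest-prefix transliteration via a single flat (grapheme, ipa) table:
-- # at each position scan the table once keeping the longest key that is a prefix
-- # of the remaining input; no per-length grapheme lists, no dict lookup.
-- _TABLE = [
--     ("i", "i"), ("a", "\u0251"), ("u", "u"), ("e", "\u0259"),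
--     ("p", "p"), ("t", "t"), ("k", "k"), ("kw", "k\u02b7"), ("q", "q"), ("qw", "q\u02b7"),
--     ("v", "v"), ("l", "\u026e"), ("z", "z"), ("y", "j"), ("r", "\u0290"), ("g", "\u0263"),
--     ("w", "\u0263\u02b7"), ("gh", "\u0281"), ("ghw", "\u0281\u02b7"),
--     ("f", "f"), ("ll", "\u026c"), ("s", "s"), ("rr", "\u0282"), ("gg", "x"), ("wh", "x\u02b7"),
--     ("ghh", "\u03c7"), ("ghhw", "\u03c7\u02b7"), ("h", "h"),
--     ("m", "m"), ("n", "n"), ("ng", "\u014b"), ("ngw", "\u014b\u02b7"),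
--     ("mm", "m\u0325"), ("nn", "n\u0325"), ("ngng", "\u014b\u030a"), ("ngngw", "\u014b\u030a\u02b7"),
--     ("'", ""),
-- ]
--
-- def graphemes2ipa(graphemes):
--     out = []
--     i = 0
--     n = len(graphemes)
--     while i < n:
--         best = None
--         for g, ipa in _TABLE:
--             if graphemes.startswith(g, i) and (best is None or len(g) > len(best[0])):
--                 best = (g, ipa)
--         if best is None:
--             out.append(graphemes[i])
--             i += 1
--         else:
--             out.append(best[1])
--             i += len(best[0])
--     return "".join(out)
-- ===== Notes on version B (the rewrite author's own statement) =====
-- stated objective: alternative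
-- what changed: Replaces the five fixed-length slice-membership tests plus dict lookup with a single flat (grapheme, ipa) table scanned once per position for the longest key prefixing the remaining input, accumulating output pieces in a list joined once.
import Mathlib
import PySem

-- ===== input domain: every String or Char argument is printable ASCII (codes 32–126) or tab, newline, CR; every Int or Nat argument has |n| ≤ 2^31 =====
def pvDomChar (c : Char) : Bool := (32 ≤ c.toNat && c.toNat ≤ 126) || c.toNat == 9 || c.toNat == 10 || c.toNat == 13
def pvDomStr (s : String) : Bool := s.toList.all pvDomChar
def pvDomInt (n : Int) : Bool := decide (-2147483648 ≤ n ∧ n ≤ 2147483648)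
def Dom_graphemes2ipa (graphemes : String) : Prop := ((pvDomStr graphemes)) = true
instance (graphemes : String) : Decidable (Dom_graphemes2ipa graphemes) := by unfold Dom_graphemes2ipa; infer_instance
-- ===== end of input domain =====

-- B replaces A's five per-length grapheme lists + dict lookup by one flat (grapheme, ipa) table
-- scanned once per position for the longest key prefixing the rest of the input, and accumulates
-- output pieces in a list joined once instead of repeated string concatenation (alternative algorithm).

-- ===== PORT A =====

-- letterToIPA, as an association list over char lists (insertion order)
def ltoIPA : List (List Char × List Char) :=
  [(['i'], ['i']), (['a'], ['ɑ']), (['u'], ['u']), (['e'], ['ə']),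
   (['p'], ['p']), (['t'], ['t']), (['k'], ['k']), (['k','w'], ['k','ʷ']), (['q'], ['q']), (['q','w'], ['q','ʷ']),
   (['v'], ['v']), (['l'], ['ɮ']), (['z'], ['z']), (['y'], ['j']), (['r'], ['ʐ']), (['g'], ['ɣ']), (['w'], ['ɣ','ʷ']),
   (['g','h'], ['ʁ']), (['g','h','w'], ['ʁ','ʷ']),
   (['f'], ['f']), (['l','l'], ['ɬ']), (['s'], ['s']), (['r','r'], ['ʂ']), (['g','g'], ['x']), (['w','h'], ['x','ʷ']),
   (['g','h','h'], ['χ']), (['g','h','h','w'], ['χ','ʷ']), (['h'], ['h']),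
   (['m'], ['m']), (['n'], ['n']), (['n','g'], ['ŋ']), (['n','g','w'], ['ŋ','ʷ']),
   (['m','m'], ['m','\u0325']), (['n','n'], ['n','\u0325']),
   (['n','g','n','g'], ['ŋ','\u030A']), (['n','g','n','g','w'], ['ŋ','\u030A','ʷ']),
   (['\''], [])]

-- letterToIPA[k]: first-match lookup; A only indexes with present keys, so the [] default is unreachable
def dictGet (d : List (List Char × List Char)) (k : List Char) : List Char :=
  match d with
  | [] => []
  | (k', v) :: rest => if k' = k then v else dictGet rest k

def fiveLG : List (List Char) := [['n','g','n','g','w']]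
def fourLG : List (List Char) := [['g','h','h','w'], ['n','g','n','g']]
def threeLG : List (List Char) := [['g','h','w'], ['g','h','h'], ['n','g','w']]
def twoLG : List (List Char) :=
  [['k','w'], ['q','w'], ['g','h'], ['l','l'], ['r','r'], ['g','g'], ['w','h'], ['n','g'], ['m','m'], ['n','n']]
def oneLG : List (List Char) :=
  [['i'], ['a'], ['u'], ['e'], ['p'], ['t'], ['k'], ['q'], ['v'], ['l'], ['z'], ['y'], ['r'], ['g'], ['w'],
   ['f'], ['s'], ['h'], ['m'], ['n']]
def apoLG : List (List Char) := [['\'']]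

-- the while loop of A, as recursion on the remaining suffix (graphemes[start:]); slices become take/drop
def loopA (cs : List Char) : List Char :=
  match cs with
  | [] => []
  | c :: rest =>
    if (c :: rest).take 5 ∈ fiveLG then dictGet ltoIPA ((c :: rest).take 5) ++ loopA ((c :: rest).drop 5)
    else if (c :: rest).take 4 ∈ fourLG then dictGet ltoIPA ((c :: rest).take 4) ++ loopA ((c :: rest).drop 4)
    else if (c :: rest).take 3 ∈ threeLG then dictGet ltoIPA ((c :: rest).take 3) ++ loopA ((c :: rest).drop 3)
    else if (c :: rest).take 2 ∈ twoLG then dictGet ltoIPA ((c :: rest).take 2) ++ loopA ((c :: rest).drop 2)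
    else if [c] ∈ oneLG then dictGet ltoIPA [c] ++ loopA rest
    else if [c] ∈ apoLG then dictGet ltoIPA [c] ++ loopA rest
    else c :: loopA rest
termination_by cs.length
decreasing_by all_goals (simp; try omega)

def graphemes2ipa (graphemes : String) : String := String.ofList (loopA graphemes.toList)

-- ===== PORT B =====

-- _TABLE of Source B: string pairs, exactly as Source B stores them
def ipaTable : List (String × String) :=
  [("i", "i"), ("a", "\u0251"), ("u", "u"), ("e", "\u0259"),
   ("p", "p"), ("t", "t"), ("k", "k"), ("kw", "k\u02B7"), ("q", "q"), ("qw", "q\u02B7"),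
   ("v", "v"), ("l", "\u026E"), ("z", "z"), ("y", "j"), ("r", "\u0290"), ("g", "\u0263"),
   ("w", "\u0263\u02B7"), ("gh", "\u0281"), ("ghw", "\u0281\u02B7"),
   ("f", "f"), ("ll", "\u026C"), ("s", "s"), ("rr", "\u0282"), ("gg", "x"), ("wh", "x\u02B7"),
   ("ghh", "\u03C7"), ("ghhw", "\u03C7\u02B7"), ("h", "h"),
   ("m", "m"), ("n", "n"), ("ng", "\u014B"), ("ngw", "\u014B\u02B7"),
   ("mm", "m\u0325"), ("nn", "n\u0325"), ("ngng", "\u014B\u030A"), ("ngngw", "\u014B\u030A\u02B7"),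
   ("'", "")]

-- body of B's inner for-loop: keep the longest table key that prefixes the rest of the input
-- (graphemes.startswith(g, i) on the suffix cs = PySem.Chars.startswith cs g.toList)
def bmF (cs : List Char) (b : Option (String × String)) (p : String × String) :
    Option (String × String) :=
  if PySem.Chars.startswith cs p.1.toList &&
       (match b with | none => true | some q => decide (q.1.toList.length < p.1.toList.length)) then some p
  else b

-- B's inner for-loop over _TABLE
def bestMatch (cs : List Char) : Option (String × String) :=
  ipaTable.foldl (bmF cs) none

-- the two lemmas below are cited by loopB's termination proof
theorem foldl_bmF_mem (cs : List Char) :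
    ∀ (l : List (String × String)) (b : Option (String × String)) (p : String × String),
      l.foldl (bmF cs) b = some p → p ∈ l ∨ b = some p := by
  intro l
  induction l with
  | nil => intro b p h; exact Or.inr h
  | cons q l ih =>
    intro b p h
    rcases ih _ _ h with h' | h'
    · exact Or.inl (List.mem_cons_of_mem _ h')
    · rcases b with _ | q' <;> simp only [bmF] at h' <;> split at h' <;> simp_all

theorem key_len_bounds : ∀ p ∈ ipaTable, 1 ≤ p.1.toList.length ∧ p.1.toList.length ≤ 5 := by decide

theorem bestMatch_len (cs : List Char) (p : String × String) (h : bestMatch cs = some p) :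
    1 ≤ p.1.toList.length := by
  rcases foldl_bmF_mem cs ipaTable none p h with h' | h'
  · exact (key_len_bounds p h').1
  · simp at h'

-- B's outer while loop, as recursion on the remaining suffix; pieces are appended left to right,
-- which is what ''.join of the collected pieces produces
def loopB (cs : List Char) : List Char :=
  match cs with
  | [] => []
  | c :: rest =>
    match hb : bestMatch (c :: rest) with
    | none => c :: loopB rest
    | some (g, v) => v.toList ++ loopB ((c :: rest).drop g.toList.length)
termination_by cs.length
decreasing_by
  · simp
  · have h1 : 1 ≤ g.toList.length := bestMatch_len (c :: rest) (g, v) hb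
    simp at h1 ⊢; omega

def graphemes2ipa_alt (graphemes : String) : String := String.ofList (loopB graphemes.toList)

-- ===== PRECONDITION & SPEC =====
def Spec_graphemes2ipa (graphemes : String) (out : String) : Prop := out = graphemes2ipa_alt graphemes
instance (graphemes : String) (out : String) : Decidable (Spec_graphemes2ipa graphemes out) := by unfold Spec_graphemes2ipa; infer_instance

-- ===== CLAIM (what is proved, stated in full; the proofs are below) =====
def Claim_equal_graphemes2ipa : Prop := ∀ (graphemes : String), Dom_graphemes2ipa graphemes → Spec_graphemes2ipa graphemes (graphemes2ipa graphemes)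

-- ===== LEMMAS AND PROOFS =====

theorem foldl_bmF_none (cs : List Char) :
    ∀ (l : List (String × String)) (b : Option (String × String)),
      (∀ p ∈ l, ¬ p.1.toList <+: cs) → l.foldl (bmF cs) b = b := by
  intro l
  induction l with
  | nil => intro b _; rfl
  | cons q l ih =>
    intro b h
    have hq : ¬ q.1.toList <+: cs := h q (List.mem_cons_self)
    rw [← PySem.Chars.startswith_iff] at hq
    simp only [List.foldl_cons]
    rw [show bmF cs b q = b by unfold bmF; simp [Bool.eq_false_iff.mpr hq]]
    exact ih b (fun p hp => h p (List.mem_cons_of_mem _ hp))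

theorem foldl_bmF_best (cs : List Char) (g v : String) :
    ∀ (l : List (String × String)) (b : Option (String × String)),
      ((g, v) ∈ l ∨ b = some (g, v)) →
      (∀ p ∈ l, p.1.toList <+: cs → p.1.toList.length < g.toList.length ∨ p = (g, v)) →
      (∀ q, b = some q → q.1.toList.length < g.toList.length ∨ q = (g, v)) →
      g.toList <+: cs →
      l.foldl (bmF cs) b = some (g, v) := by
  intro l
  induction l with
  | nil =>
    intro b h1 _ _ _
    rcases h1 with h | h
    · simp at h
    · simpa using h
  | cons p l ih =>
    intro b h1 h2 h3 hg
    have hgs : PySem.Chars.startswith cs g.toList = true := (PySem.Chars.startswith_iff _ _).mpr hg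
    simp only [List.foldl_cons]
    apply ih (bmF cs b p)
    · rcases h1 with h | h
      · rcases List.mem_cons.mp h with hpe | hml
        · right
          unfold bmF
          rcases hb : b with _ | q
          · simp [← hpe, hgs]
          · rcases h3 q hb with hlt | hqe
            · have hlt' : q.1.length < g.length := by simpa using hlt
              simp [← hpe, hgs, hlt']
            · rw [← hpe] at *; simp [hgs, hqe]
        · exact Or.inl hml
      · right
        unfold bmF
        by_cases hpre : p.1.toList <+: cs
        · have hps : PySem.Chars.startswith cs p.1.toList = true := (PySem.Chars.startswith_iff _ _).mpr hpre
          rcases h2 p List.mem_cons_self hpre with hlt | hpe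
          · have hlt' : p.1.length < g.length := by simpa using hlt
            simp [h, hps, Nat.not_lt.mpr (Nat.le_of_lt hlt')]
          · rw [hpe]; simp [h, hgs]
        · have hps : PySem.Chars.startswith cs p.1.toList = false := by
            rw [← PySem.Chars.startswith_iff] at hpre; exact Bool.eq_false_iff.mpr hpre
          simp [hps, h]
    · exact fun q hq hqpre => h2 q (List.mem_cons_of_mem _ hq) hqpre
    · intro q hq
      rcases b with _ | q' <;> simp only [bmF] at hq <;> split at hq
      · rename_i hc
        have hpq : p = q := by simpa using hq
        subst hpq
        refine h2 p List.mem_cons_self ?_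
        simp only [Bool.and_eq_true] at hc
        exact (PySem.Chars.startswith_iff _ _).mp hc.1
      · exact h3 q hq
      · rename_i hc
        have hpq : p = q := by simpa using hq
        subst hpq
        refine h2 p List.mem_cons_self ?_
        simp only [Bool.and_eq_true] at hc
        exact (PySem.Chars.startswith_iff _ _).mp hc.1
      · exact h3 q hq
    · exact hg

theorem key_nodup : ∀ p ∈ ipaTable, ∀ q ∈ ipaTable, p.1.toList = q.1.toList → p = q := by decide

theorem dict_consistent : ∀ p ∈ ipaTable, dictGet ltoIPA p.1.toList = p.2.toList := by decide

theorem key_cover : ∀ p ∈ ipaTable,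
    (p.1.toList.length = 1 → p.1.toList ∈ oneLG ∨ p.1.toList ∈ apoLG) ∧
    (p.1.toList.length = 2 → p.1.toList ∈ twoLG) ∧
    (p.1.toList.length = 3 → p.1.toList ∈ threeLG) ∧ (p.1.toList.length = 4 → p.1.toList ∈ fourLG) ∧
    (p.1.toList.length = 5 → p.1.toList ∈ fiveLG) := by decide

theorem noLonger (cs : List Char) (k : Nat)
    (h1 : k < 1 → ¬ cs.take 1 ∈ oneLG ∧ ¬ cs.take 1 ∈ apoLG)
    (h2 : k < 2 → ¬ cs.take 2 ∈ twoLG)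
    (h3 : k < 3 → ¬ cs.take 3 ∈ threeLG)
    (h4 : k < 4 → ¬ cs.take 4 ∈ fourLG)
    (h5 : k < 5 → ¬ cs.take 5 ∈ fiveLG) :
    ∀ p ∈ ipaTable, k < p.1.toList.length → cs.take p.1.toList.length ≠ p.1.toList := by
  intro p hp hlt heq
  have hb := key_len_bounds p hp
  have hcov := key_cover p hp
  rcases (by omega : p.1.toList.length = 1 ∨ p.1.toList.length = 2 ∨ p.1.toList.length = 3 ∨
      p.1.toList.length = 4 ∨ p.1.toList.length = 5) with hl | hl | hl | hl | hl
  · rw [hl] at heq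
    rcases hcov.1 hl with hm | hm
    · rw [← heq] at hm; exact (h1 (by omega)).1 hm
    · rw [← heq] at hm; exact (h1 (by omega)).2 hm
  · rw [hl] at heq
    have hm := hcov.2.1 hl; rw [← heq] at hm; exact h2 (by omega) hm
  · rw [hl] at heq
    have hm := hcov.2.2.1 hl; rw [← heq] at hm; exact h3 (by omega) hm
  · rw [hl] at heq
    have hm := hcov.2.2.2.1 hl; rw [← heq] at hm; exact h4 (by omega) hm
  · rw [hl] at heq
    have hm := hcov.2.2.2.2 hl; rw [← heq] at hm; exact h5 (by omega) hm

theorem bestMatch_eq_some (cs : List Char) (g v : String) (hgv : (g, v) ∈ ipaTable)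
    (ht : cs.take g.toList.length = g.toList)
    (hno : ∀ p ∈ ipaTable, g.toList.length < p.1.toList.length → cs.take p.1.toList.length ≠ p.1.toList) :
    bestMatch cs = some (g, v) := by
  have hg : g.toList <+: cs := ht ▸ List.take_prefix _ _
  apply foldl_bmF_best cs g v ipaTable none (Or.inl hgv) _ (by simp) hg
  intro p hp hpre
  rw [List.prefix_iff_eq_take] at hpre
  rcases lt_trichotomy p.1.toList.length g.toList.length with h | h | h
  · exact Or.inl h
  · right
    exact key_nodup p hp (g, v) hgv (by rw [hpre, h, ht])
  · exact absurd hpre.symm (hno p hp h)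

theorem bestMatch_eq_none (cs : List Char)
    (hno : ∀ p ∈ ipaTable, cs.take p.1.toList.length ≠ p.1.toList) :
    bestMatch cs = none := by
  apply foldl_bmF_none
  intro p hp hpre
  rw [List.prefix_iff_eq_take] at hpre
  exact hno p hp hpre.symm

theorem loopB_some (c : Char) (rest : List Char) (g v : String) (hb : bestMatch (c :: rest) = some (g, v)) :
    loopB (c :: rest) = v.toList ++ loopB ((c :: rest).drop g.toList.length) := by
  rw [loopB]
  split <;> simp_all

theorem loopB_none (c : Char) (rest : List Char) (hb : bestMatch (c :: rest) = none) :
    loopB (c :: rest) = c :: loopB rest := by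
  rw [loopB]
  split <;> simp_all

theorem step_match (c : Char) (rest : List Char) (g v : String) (k : Nat)
    (hgv : (g, v) ∈ ipaTable) (hk : g.toList.length = k)
    (ht : (c :: rest).take k = g.toList)
    (hno : ∀ p ∈ ipaTable, k < p.1.toList.length → (c :: rest).take p.1.toList.length ≠ p.1.toList)
    (hAB : loopA ((c :: rest).drop k) = loopB ((c :: rest).drop k)) :
    dictGet ltoIPA ((c :: rest).take k) ++ loopA ((c :: rest).drop k) = loopB (c :: rest) := by
  have hb : bestMatch (c :: rest) = some (g, v) :=
    bestMatch_eq_some _ _ _ hgv (by rw [hk]; exact ht) (by rw [hk]; exact hno)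
  rw [ht, dict_consistent (g, v) hgv, loopB_some c rest g v hb, hk, hAB]

theorem mem5 : ∀ g ∈ fiveLG, ∃ p ∈ ipaTable, p.1.toList = g ∧ g.length = 5 := by decide
theorem mem4 : ∀ g ∈ fourLG, ∃ p ∈ ipaTable, p.1.toList = g ∧ g.length = 4 := by decide
theorem mem3 : ∀ g ∈ threeLG, ∃ p ∈ ipaTable, p.1.toList = g ∧ g.length = 3 := by decide
theorem mem2 : ∀ g ∈ twoLG, ∃ p ∈ ipaTable, p.1.toList = g ∧ g.length = 2 := by decide
theorem mem1 : ∀ g ∈ oneLG, ∃ p ∈ ipaTable, p.1.toList = g ∧ g.length = 1 := by decide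
theorem memApo : ∀ g ∈ apoLG, ∃ p ∈ ipaTable, p.1.toList = g ∧ g.length = 1 := by decide

theorem loop_eq_aux : ∀ (n : Nat) (cs : List Char), cs.length ≤ n → loopA cs = loopB cs := by
  intro n
  induction n with
  | zero =>
    intro cs h
    have : cs = [] := by cases cs <;> simp_all
    subst this
    rw [loopA, loopB]
  | succ n ih =>
    intro cs hlen
    match cs with
    | [] => rw [loopA, loopB]
    | c :: rest =>
      have ihdrop : ∀ k : Nat, 1 ≤ k → loopA ((c :: rest).drop k) = loopB ((c :: rest).drop k) := by
        intro k hk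
        apply ih
        simp at hlen ⊢
        omega
      rw [loopA]
      by_cases h5 : (c :: rest).take 5 ∈ fiveLG
      · rw [if_pos h5]
        obtain ⟨p, hm, hkey, hl⟩ := mem5 _ h5
        exact step_match c rest p.1 p.2 5 hm (by rw [hkey]; exact hl) hkey.symm
          (noLonger _ 5 (by intro h; exact absurd h (by decide)) (by intro h; exact absurd h (by decide))
            (by intro h; exact absurd h (by decide)) (by intro h; exact absurd h (by decide))
            (by intro h; exact absurd h (by decide)))
          (ihdrop 5 (by omega))
      · rw [if_neg h5]
        by_cases h4 : (c :: rest).take 4 ∈ fourLG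
        · rw [if_pos h4]
          obtain ⟨p, hm, hkey, hl⟩ := mem4 _ h4
          exact step_match c rest p.1 p.2 4 hm (by rw [hkey]; exact hl) hkey.symm
            (noLonger _ 4 (by intro h; exact absurd h (by decide)) (by intro h; exact absurd h (by decide))
              (by intro h; exact absurd h (by decide)) (by intro h; exact absurd h (by decide))
              (fun _ => h5))
            (ihdrop 4 (by omega))
        · rw [if_neg h4]
          by_cases h3 : (c :: rest).take 3 ∈ threeLG
          · rw [if_pos h3]
            obtain ⟨p, hm, hkey, hl⟩ := mem3 _ h3
            exact step_match c rest p.1 p.2 3 hm (by rw [hkey]; exact hl) hkey.symm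
              (noLonger _ 3 (by intro h; exact absurd h (by decide)) (by intro h; exact absurd h (by decide))
                (by intro h; exact absurd h (by decide)) (fun _ => h4) (fun _ => h5))
              (ihdrop 3 (by omega))
          · rw [if_neg h3]
            by_cases h2 : (c :: rest).take 2 ∈ twoLG
            · rw [if_pos h2]
              obtain ⟨p, hm, hkey, hl⟩ := mem2 _ h2
              exact step_match c rest p.1 p.2 2 hm (by rw [hkey]; exact hl) hkey.symm
                (noLonger _ 2 (by intro h; exact absurd h (by decide)) (by intro h; exact absurd h (by decide))
                  (fun _ => h3) (fun _ => h4) (fun _ => h5))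
                (ihdrop 2 (by omega))
            · rw [if_neg h2]
              by_cases h1 : [c] ∈ oneLG
              · rw [if_pos h1]
                obtain ⟨p, hm, hkey, hl⟩ := mem1 _ h1
                have := step_match c rest p.1 p.2 1 hm (by rw [hkey]; exact hl) hkey.symm
                  (noLonger _ 1 (by intro h; exact absurd h (by decide)) (fun _ => h2)
                    (fun _ => h3) (fun _ => h4) (fun _ => h5))
                  (ihdrop 1 (by omega))
                simpa using this
              · rw [if_neg h1]
                by_cases hap : [c] ∈ apoLG
                · rw [if_pos hap]
                  obtain ⟨p, hm, hkey, hl⟩ := memApo _ hap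
                  have := step_match c rest p.1 p.2 1 hm (by rw [hkey]; exact hl) hkey.symm
                    (noLonger _ 1 (by intro h; exact absurd h (by decide)) (fun _ => h2)
                      (fun _ => h3) (fun _ => h4) (fun _ => h5))
                    (ihdrop 1 (by omega))
                  simpa using this
                · rw [if_neg hap]
                  have hb : bestMatch (c :: rest) = none := by
                    apply bestMatch_eq_none
                    intro p hp
                    exact noLonger (c :: rest) 0
                      (fun _ => ⟨by simpa using h1, by simpa using hap⟩)
                      (fun _ => h2) (fun _ => h3) (fun _ => h4) (fun _ => h5)
                      p hp ((key_len_bounds p hp).1)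
                  rw [loopB_none c rest hb]
                  exact congrArg (c :: ·) (ihdrop 1 (by omega))

theorem loop_eq (cs : List Char) : loopA cs = loopB cs := loop_eq_aux cs.length cs (Nat.le_refl _)

-- ===== VERDICT (by name: the statement is the Claim_ definition above) =====
theorem graphemes2ipa_spec : Claim_equal_graphemes2ipa := by
  intro graphemes _
  unfold Spec_graphemes2ipa graphemes2ipa graphemes2ipa_alt
  rw [loop_eq]
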